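-- pv_equiv track=rewrite | github.com/C2SP/wycheproof | src/gf.py | bin_divmod
-- ===== SOURCE A (Python) =====
-- BinPoly = int
--
-- def bin_divmod(x: BinPoly, y: BinPoly) -> BinPoly:
--   """Computes the quotiend and remainder of the division
--      of x by y over GF_2[x]."""
--   k = y.bit_length()
--   q = 0
--   t = x.bit_length()
--   while (t - k) >= 0:
--     x^= y << (t - k)
--     q^= 1 << (t - k)
--     t = x.bit_length()
--   return q, x
-- ===== SOURCE B (Python) =====
-- def bin_divmod(x, y):
--   """Quotient and remainder of x divided by y over GF(2)[x], computed
--   CRC-style: stream the dividend's bits through a small shift register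
--   (always below 2**(k-1)), reducing by y whenever it reaches degree k-1."""
--   k = y.bit_length()
--   q = 0
--   rem = 0
--   for i in range(x.bit_length() - 1, -1, -1):
--     rem = (rem << 1) ^ ((x >> i) & 1)
--     q <<= 1
--     if rem >> (k - 1):
--       rem ^= y
--       q ^= 1
--   return q, rem
-- ===== Notes on version B (the rewrite author's own statement) =====
-- stated objective: alternative
-- what changed: Replaces A's divisor-alignment long division (repeatedly recompute x.bit_length() and XOR a shifted copy of y under the current leading bit) with a CRC-style shift register: the dividend's bits are streamed once through a small remainder register kept below 2**(k-1), reduced by an unshifted y whenever it reaches degree k-1, the quotient built by shifting bits in.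
-- outside the precondition, e.g. on bin_divmod(5, -3): A returns (2, -1), B returns (3, 2); on bin_divmod(-5, -3): A returns (2, 1), B returns (1, -2)
import Mathlib
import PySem

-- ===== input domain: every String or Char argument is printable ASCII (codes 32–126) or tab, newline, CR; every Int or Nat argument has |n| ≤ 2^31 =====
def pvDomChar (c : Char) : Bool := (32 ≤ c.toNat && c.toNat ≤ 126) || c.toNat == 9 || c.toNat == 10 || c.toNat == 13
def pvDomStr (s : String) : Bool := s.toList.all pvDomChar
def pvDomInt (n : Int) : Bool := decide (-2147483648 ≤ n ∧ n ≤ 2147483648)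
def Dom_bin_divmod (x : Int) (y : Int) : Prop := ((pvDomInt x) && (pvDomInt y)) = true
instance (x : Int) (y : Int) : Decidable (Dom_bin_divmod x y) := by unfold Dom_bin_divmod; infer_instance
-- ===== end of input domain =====

-- B replaces A's divisor-alignment loop (shift y under the dividend's current leading
-- bit, recomputing bit_length each round) by a CRC-style shift register: the dividend's
-- bits are streamed once through a small remainder register that is reduced by y
-- whenever it reaches degree k-1 (objective: alternative algorithm, same cost).

-- ===== PORT A =====
-- A's while loop, as recursion with a fuel counter that only makes it total:
-- under Pre_ (0 ≤ x, 0 < y) each iteration strictly decreases x.bit_length(), so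
-- bit_length x + 1 units of fuel are provably enough (see bin_divmod_spec); the
-- fuel-exhausted branch is never reached on Pre_.
def binDivmodLoopA (y : Int) (k : Nat) : Nat → Int → Int → Int × Int
  | 0, q, x => (q, x)
  | f + 1, q, x =>
    let t := PySem.Int.bitLength x
    if k ≤ t then      -- Python: (t - k) >= 0
      binDivmodLoopA y k f (PySem.Int.bxor q (1 <<< (t - k))) (PySem.Int.bxor x (y <<< (t - k)))
    else (q, x)

def bin_divmod (x : Int) (y : Int) : Int × Int :=
  binDivmodLoopA y (PySem.Int.bitLength y) (PySem.Int.bitLength x + 1) 0 x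

-- ===== PORT B =====
-- one iteration of Source B's for-body on state (q, rem); i ≥ 0 inside the range, so
-- i.toNat is exact; 'if rem >> (k-1):' is the nonzero test; k - 1 in Nat is exact
-- for k ≥ 1, and for k = 0 (y = 0, excluded by Pre_) Python raises ValueError.
def binStepB (x : Int) (y : Int) (k : Nat) (st : Int × Int) (i : Int) : Int × Int :=
  let rem := PySem.Int.bxor (st.2 <<< (1 : Nat)) (PySem.Int.band (x >>> i.toNat) 1)
  let q := st.1 <<< (1 : Nat)
  if rem >>> (k - 1) ≠ 0 then (PySem.Int.bxor q 1, PySem.Int.bxor rem y) else (q, rem)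

def bin_divmod_alt (x : Int) (y : Int) : Int × Int :=
  let k := PySem.Int.bitLength y
  (PySem.List.pyRange ((PySem.Int.bitLength x : Int) - 1) (-1) (-1)).foldl
    (binStepB x y k) (0, 0)

-- ===== PRECONDITION & SPEC =====
-- Pre_ is the function's natural domain, GF(2) polynomials with a nonzero divisor:
-- for y = 0 A loops forever (and B raises); for negative x or y A's bit_length/xor
-- mix sign-garbled values and either diverges or returns accidental results no
-- caller could want.
def Pre_bin_divmod (x : Int) (y : Int) : Prop := 0 ≤ x ∧ 0 < y
instance (x : Int) (y : Int) : Decidable (Pre_bin_divmod x y) := by unfold Pre_bin_divmod; infer_instance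
def pvWitness_bin_divmod : Int × Int := (100, 7)

def Spec_bin_divmod (x : Int) (y : Int) (out : Int × Int) : Prop := out = bin_divmod_alt x y
instance (x : Int) (y : Int) (out : Int × Int) : Decidable (Spec_bin_divmod x y out) := by unfold Spec_bin_divmod; infer_instance

-- ===== CLAIM (what is proved, stated in full; the proofs are below) =====
def Claim_equal_bin_divmod : Prop := ∀ (x : Int) (y : Int), Dom_bin_divmod x y → Pre_bin_divmod x y → Spec_bin_divmod x y (bin_divmod x y)

-- ===== LEMMAS AND PROOFS =====

-- a number below 2^(i+1) whose bit i is clear lies below 2^i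
lemma lt_two_pow_of_testBit_false {n i : Nat} (h1 : n < 2 ^ (i + 1)) (h2 : n.testBit i = false) :
    n < 2 ^ i := by
  rw [Nat.testBit_eq_decide_div_mod_eq, decide_eq_false_iff_not] at h2
  have hlt : n / 2 ^ i < 2 := Nat.div_lt_of_lt_mul (by rw [pow_succ] at h1; exact h1)
  have h0 : n / 2 ^ i = 0 := by
    generalize hd : n / 2 ^ i = d at h2 hlt ⊢
    omega
  exact Nat.lt_of_div_eq_zero (Nat.two_pow_pos i) h0

-- xor of two numbers with the same top bit i drops below 2^i
lemma xor_top_cancel {a b i : Nat} (ha1 : 2 ^ i ≤ a) (ha2 : a < 2 ^ (i + 1))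
    (hb1 : 2 ^ i ≤ b) (hb2 : b < 2 ^ (i + 1)) : a ^^^ b < 2 ^ i := by
  have hxlt : a ^^^ b < 2 ^ (i + 1) := Nat.xor_lt_two_pow ha2 hb2
  have hbit : (a ^^^ b).testBit i = false := by
    rw [Nat.testBit_xor,
      Nat.testBit_of_two_pow_le_and_two_pow_add_one_gt ha1 ha2,
      Nat.testBit_of_two_pow_le_and_two_pow_add_one_gt hb1 hb2]
    rfl
  exact lt_two_pow_of_testBit_false hxlt hbit

-- bitLength on a natural number, characterised by the two PySem bounds
lemma bitLength_le_iff (n : Nat) (m : Nat) : PySem.Int.bitLength (n : Int) ≤ m ↔ n < 2 ^ m := by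
  constructor
  · intro h
    have := PySem.Int.lt_two_pow_bitLength (n : Int)
    simp only [Int.natAbs_natCast] at this
    exact lt_of_lt_of_le this (Nat.pow_le_pow_right (by norm_num) h)
  · intro h
    by_cases hn : n = 0
    · subst hn; simp [PySem.Int.bitLength_zero]
    · by_contra hle
      rw [not_le] at hle
      have h2 := PySem.Int.two_pow_bitLength_le (n : Int) (by exact_mod_cast hn)
      simp only [Int.natAbs_natCast] at h2
      have : 2 ^ m ≤ 2 ^ (PySem.Int.bitLength (n : Int) - 1) :=
        Nat.pow_le_pow_right (by norm_num) (by omega)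
      omega

lemma bitLength_eq_of_mem {n i : Nat} (h1 : 2 ^ i ≤ n) (h2 : n < 2 ^ (i + 1)) :
    PySem.Int.bitLength (n : Int) = i + 1 := by
  have hu : PySem.Int.bitLength (n : Int) ≤ i + 1 := (bitLength_le_iff n (i + 1)).mpr h2
  have hl : ¬ PySem.Int.bitLength (n : Int) ≤ i := fun h => absurd ((bitLength_le_iff n i).mp h) (by omega)
  omega

-- when the loop's guard is already false, A's loop returns its state at any fuel
lemma loopA_done {y : Int} {k : Nat} {q x : Int} (h : ¬ k ≤ PySem.Int.bitLength x) :
    ∀ f, binDivmodLoopA y k f q x = (q, x) := by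
  intro f
  cases f with
  | zero => rfl
  | succ f => simp [binDivmodLoopA, h]

-- xor into the clear low bits: (2^i * a) ^^^ b = 2^i * a + b for b < 2^i
lemma xor_into_low {i b : Nat} (a : Nat) (hb : b < 2 ^ i) :
    (2 ^ i * a) ^^^ b = 2 ^ i * a + b := by
  apply Nat.eq_of_testBit_eq
  intro j
  have hmul : 2 ^ i * a = 2 ^ i * a + 0 := by omega
  rw [Nat.testBit_xor, Nat.testBit_two_pow_mul_add a hb j, hmul,
    Nat.testBit_two_pow_mul_add a (Nat.two_pow_pos i) j]
  by_cases hj : j < i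
  · simp [hj]
  · have hbj : b.testBit j = false :=
      Nat.testBit_lt_two_pow (lt_of_lt_of_le hb (Nat.pow_le_pow_right (by norm_num) (by omega)))
    simp [hj, hbj]

-- xor of two numbers aligned at 2^i, below an untouched low part
lemma xor_aligned {i b : Nat} (a c : Nat) (hb : b < 2 ^ i) :
    (2 ^ i * a + b) ^^^ (2 ^ i * c) = 2 ^ i * (a ^^^ c) + b := by
  apply Nat.eq_of_testBit_eq
  intro j
  have hmul : 2 ^ i * c = 2 ^ i * c + 0 := by omega
  rw [Nat.testBit_xor, Nat.testBit_two_pow_mul_add a hb j, hmul,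
    Nat.testBit_two_pow_mul_add c (Nat.two_pow_pos i) j,
    Nat.testBit_two_pow_mul_add (a ^^^ c) hb j]
  by_cases hj : j < i
  · simp [hj]
  · simp [hj, Nat.testBit_xor]

-- one iteration of B, on cast-Nat state, is a Nat-level shift-in with reduction test
lemma stepB_eq (x y : Nat) (k : Nat) (q rem : Nat) (i : Nat) (ii : Int) (hii : ii = (i : Int)) :
    binStepB (x : Int) (y : Int) k ((q : Int), (rem : Int)) ii =
      (if 2 ^ (k - 1) ≤ 2 * rem + x / 2 ^ i % 2
       then ((((2 * q) ^^^ 1 : Nat) : Int), (((2 * rem + x / 2 ^ i % 2) ^^^ y : Nat) : Int))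
       else (((2 * q : Nat) : Int), ((2 * rem + x / 2 ^ i % 2 : Nat) : Int))) := by
  subst hii
  have hbit : x / 2 ^ i % 2 < 2 := Nat.mod_lt _ (by norm_num)
  have hrem : PySem.Int.bxor ((rem : Int) <<< (1 : Nat)) (PySem.Int.band ((x : Int) >>> ((i : Int)).toNat) 1) =
      ((2 * rem + x / 2 ^ i % 2 : Nat) : Int) := by
    rw [Int.toNat_natCast, ← Int.natCast_shiftLeft, ← Int.natCast_shiftRight,
      show (1 : Int) = ((1 : Nat) : Int) from rfl, PySem.Int.band_natCast, PySem.Int.bxor_natCast]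
    congr 1
    rw [Nat.and_one_is_mod, Nat.shiftRight_eq_div_pow, Nat.shiftLeft_eq]
    calc rem * 2 ^ 1 ^^^ x / 2 ^ i % 2
        = 2 ^ 1 * rem ^^^ x / 2 ^ i % 2 := by rw [Nat.mul_comm]
      _ = 2 ^ 1 * rem + x / 2 ^ i % 2 := xor_into_low rem (by omega)
      _ = 2 * rem + x / 2 ^ i % 2 := by norm_num
  have hq : ((q : Int) <<< (1 : Nat)) = ((2 * q : Nat) : Int) := by
    rw [← Int.natCast_shiftLeft, Nat.shiftLeft_eq]
    push_cast
    ring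
  simp only [binStepB, hrem, hq]
  have hcond : (((2 * rem + x / 2 ^ i % 2 : Nat) : Int) >>> (k - 1) ≠ 0) ↔
      2 ^ (k - 1) ≤ 2 * rem + x / 2 ^ i % 2 := by
    rw [← Int.natCast_shiftRight, Ne, Int.natCast_eq_zero, Nat.shiftRight_eq_div_pow]
    rw [Nat.div_eq_zero_iff]
    have := Nat.two_pow_pos (k - 1)
    omega
  by_cases hc : 2 ^ (k - 1) ≤ 2 * rem + x / 2 ^ i % 2
  · rw [if_pos (hcond.mpr hc), if_pos hc,
      show (1 : Int) = ((1 : Nat) : Int) from rfl, PySem.Int.bxor_natCast, PySem.Int.bxor_natCast]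
  · rw [if_neg (fun h => hc (hcond.mp h)), if_neg hc]

-- splitting the low i+1 bits of x at position i
lemma split_low (x i : Nat) (rem : Nat) :
    rem * 2 ^ (i + 1) + x % 2 ^ (i + 1) = 2 ^ i * (2 * rem + x / 2 ^ i % 2) + x % 2 ^ i := by
  rw [Nat.mod_pow_succ]
  ring

-- THE ENGINE: B's shift-register scan over positions i..0 equals A's loop, provided
-- the register rem is already reduced (rem < 2^(k-1)); A's state carries the same
-- data, with the still-unprocessed low bits of x attached below the register.
lemma engine (x y k : Nat) (hk1 : 2 ^ (k - 1) ≤ y) (hk2 : y < 2 ^ k) (hk : 1 ≤ k) :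
    ∀ (i : Nat) (q rem f : Nat), rem < 2 ^ (k - 1) → i < f →
      (PySem.List.pyRange (i : Int) (-1) (-1)).foldl (binStepB (x : Int) (y : Int) k) ((q : Int), (rem : Int))
        = binDivmodLoopA (y : Int) k f ((q * 2 ^ (i + 1) : Nat) : Int) ((rem * 2 ^ (i + 1) + x % 2 ^ (i + 1) : Nat) : Int) := by
  have h2k : 2 ^ k = 2 * 2 ^ (k - 1) := by
    rw [← pow_succ']
    congr 1
    omega
  intro i
  induction i with
  | zero =>
    intro q rem f hrem hf
    rw [PySem.List.pyRange_neg_one_cons (by omega), PySem.List.pyRange_neg_one_eq_nil (by omega)]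
    simp only [List.foldl_cons, List.foldl_nil]
    rw [stepB_eq x y k q rem 0 _ rfl]
    have hbit : x / 2 ^ 0 % 2 < 2 := Nat.mod_lt _ (by norm_num)
    have hR : rem * 2 ^ (0 + 1) + x % 2 ^ (0 + 1) = 2 * rem + x / 2 ^ 0 % 2 := by
      rw [split_low x 0 rem]
      norm_num
      omega
    have hrk : 2 * rem + x / 2 ^ 0 % 2 < 2 ^ k := by omega
    by_cases hc : 2 ^ (k - 1) ≤ 2 * rem + x / 2 ^ 0 % 2
    · rw [if_pos hc]
      have hbl : PySem.Int.bitLength ((rem * 2 ^ (0 + 1) + x % 2 ^ (0 + 1) : Nat) : Int) = k := by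
        rw [hR]
        have := bitLength_eq_of_mem (i := k - 1) hc (by omega)
        rw [this]; omega
      obtain ⟨f', rfl⟩ : ∃ f', f = f' + 1 := ⟨f - 1, by omega⟩
      show _ = binDivmodLoopA (y : Int) k (f' + 1) _ _
      rw [binDivmodLoopA]
      simp only [hbl, if_pos (le_refl k), Nat.sub_self]
      simp only [← Int.natCast_shiftLeft, PySem.Int.bxor_natCast, hR]
      have hq : q * 2 ^ (0 + 1) ^^^ (1 : Nat) <<< 0 = (2 * q) ^^^ 1 := by
        have h1 : q * 2 ^ (0 + 1) = 2 * q := by ring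
        have h2 : (1 : Nat) <<< 0 = 1 := rfl
        rw [h1, h2]
      have hx2 : (2 * rem + x / 2 ^ 0 % 2) ^^^ y <<< 0 = (2 * rem + x / 2 ^ 0 % 2) ^^^ y := by
        norm_num
      rw [hq, hx2]
      have hdrop : (2 * rem + x / 2 ^ 0 % 2) ^^^ y < 2 ^ (k - 1) := by
        have := xor_top_cancel (i := k - 1) hc (by omega) hk1 (by omega)
        exact this
      have hstop : ¬ k ≤ PySem.Int.bitLength (((2 * rem + x / 2 ^ 0 % 2) ^^^ y : Nat) : Int) := by
        have hle := (bitLength_le_iff ((2 * rem + x / 2 ^ 0 % 2) ^^^ y) (k - 1)).mpr hdrop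
        omega
      rw [loopA_done hstop]
    · rw [if_neg hc]
      rw [not_le] at hc
      have hstop : ¬ k ≤ PySem.Int.bitLength ((rem * 2 ^ (0 + 1) + x % 2 ^ (0 + 1) : Nat) : Int) := by
        have hle := (bitLength_le_iff (rem * 2 ^ (0 + 1) + x % 2 ^ (0 + 1)) (k - 1)).mpr (by omega)
        omega
      rw [loopA_done hstop]
      have h1 : (2 * q : Nat) = q * 2 ^ (0 + 1) := by ring
      have h2 : (2 * rem + x / 2 ^ 0 % 2 : Nat) = rem * 2 ^ (0 + 1) + x % 2 ^ (0 + 1) := by omega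
      rw [h1, h2]
  | succ i ih =>
    intro q rem f hrem hf
    rw [show ((i + 1 : Nat) : Int) = ((i : Nat) : Int) + 1 by push_cast; ring]
    rw [PySem.List.pyRange_neg_one_cons (by omega)]
    simp only [List.foldl_cons, add_sub_cancel_right]
    rw [stepB_eq x y k q rem (i + 1) _ (by push_cast; ring)]
    have hbit : x / 2 ^ (i + 1) % 2 < 2 := Nat.mod_lt _ (by norm_num)
    have hR : rem * 2 ^ (i + 1 + 1) + x % 2 ^ (i + 1 + 1) =
        2 ^ (i + 1) * (2 * rem + x / 2 ^ (i + 1) % 2) + x % 2 ^ (i + 1) := split_low x (i + 1) rem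
    have hxlow : x % 2 ^ (i + 1) < 2 ^ (i + 1) := Nat.mod_lt _ (Nat.two_pow_pos _)
    have hrk : 2 * rem + x / 2 ^ (i + 1) % 2 < 2 ^ k := by omega
    by_cases hc : 2 ^ (k - 1) ≤ 2 * rem + x / 2 ^ (i + 1) % 2
    · rw [if_pos hc]
      have hlo : 2 ^ (i + k) ≤ rem * 2 ^ (i + 1 + 1) + x % 2 ^ (i + 1 + 1) := by
        rw [hR]
        calc 2 ^ (i + k) = 2 ^ (i + 1) * 2 ^ (k - 1) := by
              rw [← pow_add]; congr 1; omega
          _ ≤ 2 ^ (i + 1) * (2 * rem + x / 2 ^ (i + 1) % 2) := Nat.mul_le_mul_left _ hc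
          _ ≤ _ := Nat.le_add_right _ _
      have hhi : rem * 2 ^ (i + 1 + 1) + x % 2 ^ (i + 1 + 1) < 2 ^ (i + k + 1) := by
        rw [hR]
        have h1 : 2 ^ (i + 1) * (2 * rem + x / 2 ^ (i + 1) % 2) + x % 2 ^ (i + 1)
            < 2 ^ (i + 1) * (2 * rem + x / 2 ^ (i + 1) % 2) + 2 ^ (i + 1) := by omega
        have h2 : 2 ^ (i + 1) * (2 * rem + x / 2 ^ (i + 1) % 2) + 2 ^ (i + 1)
            ≤ 2 ^ (i + 1) * 2 ^ k := by
          have : 2 * rem + x / 2 ^ (i + 1) % 2 + 1 ≤ 2 ^ k := by omega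
          calc 2 ^ (i + 1) * (2 * rem + x / 2 ^ (i + 1) % 2) + 2 ^ (i + 1)
              = 2 ^ (i + 1) * (2 * rem + x / 2 ^ (i + 1) % 2 + 1) := by ring
            _ ≤ 2 ^ (i + 1) * 2 ^ k := Nat.mul_le_mul_left _ this
        calc 2 ^ (i + 1) * (2 * rem + x / 2 ^ (i + 1) % 2) + x % 2 ^ (i + 1)
            < 2 ^ (i + 1) * 2 ^ k := by omega
          _ = 2 ^ (i + k + 1) := by rw [← pow_add]; congr 1; omega
      have hbl : PySem.Int.bitLength ((rem * 2 ^ (i + 1 + 1) + x % 2 ^ (i + 1 + 1) : Nat) : Int) = i + k + 1 :=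
        bitLength_eq_of_mem hlo hhi
      obtain ⟨f', rfl⟩ : ∃ f', f = f' + 1 := ⟨f - 1, by omega⟩
      show _ = binDivmodLoopA (y : Int) k (f' + 1) _ _
      rw [binDivmodLoopA]
      simp only [hbl, if_pos (by omega : k ≤ i + k + 1)]
      rw [show i + k + 1 - k = i + 1 by omega]
      simp only [show (1 : Int) = ((1 : Nat) : Int) from rfl, ← Int.natCast_shiftLeft,
        PySem.Int.bxor_natCast]
      have hq : q * 2 ^ (i + 1 + 1) ^^^ (1 : Nat) <<< (i + 1) = ((2 * q) ^^^ 1) * 2 ^ (i + 1) := by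
        have h0 : q * 2 ^ (i + 1 + 1) = 2 ^ (i + 1) * (2 * q) + 0 := by ring
        have h1 : (1 : Nat) <<< (i + 1) = 2 ^ (i + 1) * 1 := by
          rw [Nat.shiftLeft_eq]; ring
        rw [h0, h1, xor_aligned (2 * q) 1 (Nat.two_pow_pos _)]
        ring
      have hx2 : (rem * 2 ^ (i + 1 + 1) + x % 2 ^ (i + 1 + 1)) ^^^ y <<< (i + 1) =
          ((2 * rem + x / 2 ^ (i + 1) % 2) ^^^ y) * 2 ^ (i + 1) + x % 2 ^ (i + 1) := by
        have h1 : y <<< (i + 1) = 2 ^ (i + 1) * y := by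
          rw [Nat.shiftLeft_eq]; ring
        rw [hR, h1, xor_aligned _ y hxlow]
        ring
      rw [hq, hx2]
      have hdrop : (2 * rem + x / 2 ^ (i + 1) % 2) ^^^ y < 2 ^ (k - 1) :=
        xor_top_cancel (i := k - 1) hc (by omega) hk1 (by omega)
      exact ih ((2 * q) ^^^ 1) ((2 * rem + x / 2 ^ (i + 1) % 2) ^^^ y) f' hdrop (by omega)
    · rw [if_neg hc]
      rw [not_le] at hc
      have h1 : 2 * q * 2 ^ (i + 1) = q * 2 ^ (i + 1 + 1) := by ring
      have h2 : (2 * rem + x / 2 ^ (i + 1) % 2) * 2 ^ (i + 1) + x % 2 ^ (i + 1)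
          = rem * 2 ^ (i + 1 + 1) + x % 2 ^ (i + 1 + 1) := by rw [hR]; ring
      have hrec := ih (2 * q) (2 * rem + x / 2 ^ (i + 1) % 2) f hc (by omega)
      rw [h1, h2] at hrec
      exact hrec

-- ===== VERDICT (by name: the statement is the Claim_ definition above) =====
theorem bin_divmod_spec : Claim_equal_bin_divmod := by
  intro x y _hdom hpre
  obtain ⟨hx, hy⟩ := hpre
  unfold Spec_bin_divmod bin_divmod bin_divmod_alt
  dsimp only
  obtain ⟨nx, rfl⟩ : ∃ n : Nat, x = (n : Int) := ⟨x.toNat, (Int.toNat_of_nonneg hx).symm⟩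
  obtain ⟨yn, rfl⟩ : ∃ m : Nat, y = (m : Int) := ⟨y.toNat, (Int.toNat_of_nonneg (le_of_lt hy)).symm⟩
  have hyn : yn ≠ 0 := by
    intro h; subst h; simp at hy
  set N := PySem.Int.bitLength ((nx : Nat) : Int) with hN
  set K := PySem.Int.bitLength ((yn : Nat) : Int) with hK
  have hK1 : 1 ≤ K := by
    by_contra h
    have hle : K ≤ 0 := by omega
    have := (bitLength_le_iff yn 0).mp (hK ▸ hle)
    omega
  have hky1 : 2 ^ (K - 1) ≤ yn := by
    have := PySem.Int.two_pow_bitLength_le ((yn : Nat) : Int) (by exact_mod_cast hyn)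
    simpa [← hK] using this
  have hky2 : yn < 2 ^ K := by
    have := PySem.Int.lt_two_pow_bitLength ((yn : Nat) : Int)
    simpa [← hK] using this
  have hnN : nx < 2 ^ N := by
    have := PySem.Int.lt_two_pow_bitLength ((nx : Nat) : Int)
    simpa [← hN] using this
  by_cases hn0 : N = 0
  · -- x = 0: the stream is empty and A's guard fails at once
    have hx0 : nx = 0 := by
      rw [hn0] at hnN
      simpa using hnN
    subst hx0
    rw [show ((N : Int) - 1) = (-1 : Int) by rw [hn0]; norm_num]
    rw [PySem.List.pyRange_neg_one_eq_nil (by omega)]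
    simp only [List.foldl_nil]
    have hstop : ¬ K ≤ PySem.Int.bitLength (((0 : Nat) : Nat) : Int) := by
      have : PySem.Int.bitLength (((0 : Nat) : Nat) : Int) = 0 := by
        simp [PySem.Int.bitLength_zero]
      omega
    rw [loopA_done (q := 0) (x := ((0 : Nat) : Int)) hstop]
    norm_num
  · -- x > 0: run the engine over positions N-1 .. 0
    have hcast : ((N : Int) - 1) = ((N - 1 : Nat) : Int) := by omega
    rw [hcast]
    have hres := engine nx yn K hky1 hky2 hK1 (N - 1) 0 0 (N + 1) (Nat.two_pow_pos _) (by omega)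
    have hexp : N - 1 + 1 = N := by omega
    rw [hexp] at hres
    simp only [Nat.zero_mul, Nat.zero_add, Nat.cast_zero] at hres
    rw [Nat.mod_eq_of_lt hnN] at hres
    exact hres.symm
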